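-- pv_equiv track=rewrite | github.com/pavpanchekha/fpsim | fpan.py | criticalize
-- ===== SOURCE A (Python) =====
-- def critical_gates(fpan):
--     """Return the list of gate indices on the critical path of ``fpan``.
--
--     Each entry of ``fpan`` is a tuple ``(a, b, op)``.  The gate takes two
--     inputs and writes two outputs back to registers ``a`` and ``b``.  The
--     latency to each output depends on ``op``:
--
--     ``ts``  -> ``(3, 15)``
--     ``fts`` -> ``(3, 9)``
--     ``add`` -> ``(3, 3)``
--     ``cts`` -> ``(3, 11)``
--
--     The critical path is the dependency chain with the largest total latency.
--     Gate indices are returned 0-based.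
--     """
--
--     if not fpan:
--         return []
--
--     n_regs = max(max(a, b) for a, b, _ in fpan)
--
--     reg_time = [0] * (n_regs + 1)
--     reg_src = [None] * (n_regs + 1)
--
--     gate_info = []
--
--     latencies = {
--         "ts": (3, 15),
--         "fts": (3, 9),
--         "add": (3, 3),
--         "cts": (3, 11),
--     }
--
--     for i, (ra, rb, op) in enumerate(fpan):
--         ia_time = reg_time[ra]
--         ib_time = reg_time[rb]
--         ia_src = reg_src[ra]
--         ib_src = reg_src[rb]
--         start = max(ia_time, ib_time)
--         gate_info.append((ia_src, ia_time, ib_src, ib_time, start))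
--
--         a_lat, b_lat = latencies[op]
--         reg_time[ra] = start + a_lat
--         reg_src[ra] = i
--         reg_time[rb] = start + b_lat
--         reg_src[rb] = i
--
--     max_time = max(reg_time[1:])
--     worklist = [reg_src[r] for r in range(1, n_regs + 1)
--                 if reg_time[r] == max_time and reg_src[r] is not None]
--
--     crit = set()
--     while worklist:
--         idx = worklist.pop()
--         if idx is None or idx in crit:
--             continue
--         crit.add(idx)
--         ia_src, ia_time, ib_src, ib_time, start = gate_info[idx]
--         if ia_time == start and ia_src is not None:
--             worklist.append(ia_src)
--         if ib_time == start and ib_src is not None: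
--             worklist.append(ib_src)
--
--     return set(crit)
--
-- def criticalize(fpan):
--     crit = critical_gates(fpan)
--     out = []
--     for i, (a, b, t) in enumerate(fpan):
--         if t == "ts":
--             out.append((a, b, "cts" if i in crit else "ts"))
--         else:
--             out.append((a, b, t))
--     if out != fpan:
--         return criticalize(out)
--     else:
--         return out
-- ===== SOURCE B (Python) =====
-- def criticalize(fpan):
--     # Iterative fixpoint loop (no recursion, no helper): each pass recomputes
--     # latencies, collects per-gate critical predecessors, resolves the critical
--     # set by one reverse sweep (instead of a worklist), and flips ts -> cts.
--     cur = list(fpan)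
--     while True:
--         if not cur:
--             return cur
--         n_regs = max(max(a, b) for a, b, _ in cur)
--         lat = {"ts": (3, 15), "fts": (3, 9), "add": (3, 3), "cts": (3, 11)}
--         reg_time = [0] * (n_regs + 1)
--         reg_src = [None] * (n_regs + 1)
--         preds = []
--         for i, (a, b, op) in enumerate(cur):
--             ta, sa = reg_time[a], reg_src[a]
--             tb, sb = reg_time[b], reg_src[b]
--             start = max(ta, tb)
--             preds.append([s for t, s in ((ta, sa), (tb, sb))
--                           if t == start and s is not None])
--             la, lb = lat[op]
--             reg_time[a] = start + la
--             reg_src[a] = i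
--             reg_time[b] = start + lb
--             reg_src[b] = i
--         max_time = max(reg_time[1:])
--         crit = {reg_src[r] for r in range(1, n_regs + 1)
--                 if reg_time[r] == max_time and reg_src[r] is not None}
--         # predecessors of gate i all have index < i, so one reverse sweep
--         # saturates the backward closure
--         for i in range(len(cur) - 1, -1, -1):
--             if i in crit:
--                 crit.update(preds[i])
--         nxt = [(a, b, "cts" if op == "ts" and i in crit else op)
--                for i, (a, b, op) in enumerate(cur)]
--         if nxt == cur:
--             return cur
--         cur = nxt
-- ===== Notes on version B (the rewrite author's own statement) =====
-- stated objective: alternative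
-- what changed: A's tail recursion with a critical_gates helper that back-traces the critical path via a worklist stack is replaced by one iterative while-True fixpoint loop that builds per-gate predecessor lists during the forward pass and saturates the critical set with a single reverse index sweep (predecessors always have smaller indices).
import Mathlib
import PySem

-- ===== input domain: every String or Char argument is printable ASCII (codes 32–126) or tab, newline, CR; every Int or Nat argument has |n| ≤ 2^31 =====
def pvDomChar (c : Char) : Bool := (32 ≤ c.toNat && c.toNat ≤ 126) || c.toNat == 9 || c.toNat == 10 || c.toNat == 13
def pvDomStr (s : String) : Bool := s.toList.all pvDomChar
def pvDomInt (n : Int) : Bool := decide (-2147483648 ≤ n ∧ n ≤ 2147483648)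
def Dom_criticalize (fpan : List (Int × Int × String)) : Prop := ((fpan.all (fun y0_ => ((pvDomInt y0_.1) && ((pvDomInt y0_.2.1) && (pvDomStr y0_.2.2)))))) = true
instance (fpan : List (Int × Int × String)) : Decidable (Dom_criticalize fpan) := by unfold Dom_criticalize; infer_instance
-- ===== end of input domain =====

-- B replaces A's tail recursion + worklist back-trace by one iterative fixpoint loop whose
-- critical set is resolved by a single reverse index sweep over per-gate predecessor lists
-- (objective: alternative decomposition, same cost).

-- gate-info record stored by A per gate: (ia_src, ia_time, ib_src, ib_time, start)
abbrev PvGI : Type := Option Int × Int × Option Int × Int × Int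

-- shared latency table (the dict literal both Pythons contain)
def pvLat : PySem.Dict String (Int × Int) :=
  PySem.Dict.ofList [("ts", (3, 15)), ("fts", (3, 9)), ("add", (3, 3)), ("cts", (3, 11))]

-- number of "ts" gates: the termination measure of both fixpoint computations
def pvTsCount (l : List (Int × Int × String)) : Nat := l.countP (fun g => g.2.2 == "ts")

-- ts-count lemmas cited by the decreasing_by of both ports
theorem pv_flip_le (g : Int × Int × Int × String → Int × Int × String)
    (hg : ∀ p, g p = p.2 ∨ (g p).2.2 = "cts") :
    ∀ (l : List (Int × Int × String)) (s : Int),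
      pvTsCount ((PySem.List.enumerate l s).map g) ≤ pvTsCount l := by
  intro l
  induction l with
  | nil => intro s; simp [pvTsCount, PySem.List.enumerate_nil]
  | cons x xs ih =>
    intro s
    have ihs := ih (s + 1)
    simp only [pvTsCount, PySem.List.enumerate_cons, List.map_cons, List.countP_cons] at ihs ⊢
    rcases hg (s, x) with h | h
    · replace h : g (s, x) = x := h
      rw [h]; omega
    · have hcts : ((g (s, x)).2.2 == "ts") = false := by simp [h]
      rw [hcts]
      simp only [Bool.false_eq_true, if_false]
      omega

theorem pv_flip_lt (g : Int × Int × Int × String → Int × Int × String)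
    (hg : ∀ p, g p = p.2 ∨ ((g p).2.2 = "cts" ∧ p.2.2.2 = "ts")) :
    ∀ (l : List (Int × Int × String)) (s : Int),
      (PySem.List.enumerate l s).map g ≠ l →
      pvTsCount ((PySem.List.enumerate l s).map g) < pvTsCount l := by
  have hg' : ∀ p, g p = p.2 ∨ (g p).2.2 = "cts" := fun p => (hg p).imp id And.left
  intro l
  induction l with
  | nil =>
    intro s hne
    rw [PySem.List.enumerate_nil] at hne
    exact absurd rfl hne
  | cons x xs ih =>
    intro s hne
    rw [PySem.List.enumerate_cons] at hne ⊢
    simp only [List.map_cons] at hne ⊢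
    simp only [pvTsCount, List.countP_cons]
    rcases hg (s, x) with h | h
    · replace h : g (s, x) = x := h
      have hne' : (PySem.List.enumerate xs (s + 1)).map g ≠ xs := by
        intro hEq; rw [h, hEq] at hne; exact hne rfl
      have := ih (s + 1) hne'
      simp only [pvTsCount] at this
      rw [h]; omega
    · replace h : (g (s, x)).2.2 = "cts" ∧ x.2.2 = "ts" := h
      have hle := pv_flip_le g hg' xs (s + 1)
      simp only [pvTsCount] at hle
      have h1 : ((g (s, x)).2.2 == "ts") = false := by simp [h.1]
      have h2 : (x.2.2 == "ts") = true := by simp [h.2]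
      rw [h1, h2]
      simp only [Bool.false_eq_true, if_false, if_true]
      omega

-- worklist-measure lemmas cited by pvWlLoop's decreasing_by
theorem pv_contains_eq (u : List Int) (y : Int) : u.contains y = decide (y ∈ u) := by simp

theorem pv_filter_imp_le {α : Type} (p q : α → Bool) (h : ∀ k, p k = true → q k = true) :
    ∀ l : List α, (l.filter p).length ≤ (l.filter q).length := by
  intro l
  induction l with
  | nil => simp
  | cons a l ih =>
    simp only [List.filter_cons]
    cases hp : p a
    · cases hq : q a <;> simp <;> omega
    · rw [h a hp]
      simp
      omega

theorem pv_filter_imp_lt {α : Type} (p q : α → Bool) (h : ∀ k, p k = true → q k = true)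
    (k0 : α) (hp : p k0 = false) (hq : q k0 = true) :
    ∀ l : List α, k0 ∈ l → (l.filter p).length < (l.filter q).length := by
  intro l
  induction l with
  | nil => intro hk; cases hk
  | cons a l ih =>
    intro hk
    have hle := pv_filter_imp_le p q h l
    simp only [List.filter_cons]
    by_cases ha : a = k0
    · subst ha
      rw [hp, hq]
      simp
      omega
    · have hk' : k0 ∈ l := by
        rcases List.mem_cons.mp hk with h2 | h2
        · exact absurd h2.symm ha
        · exact h2
      have hlt := ih hk'
      cases hp2 : p a
      · cases hq2 : q a <;> simp <;> omega
      · rw [h a hp2]; simp; omega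

theorem pvMu_imp (crit : List Int) (idx : Int) (n : Nat) :
    ∀ k : Nat, (! (PySem.Set.add crit idx).contains ((k : Int) - (n : Int))) = true →
      (! crit.contains ((k : Int) - (n : Int))) = true := by
  intro k hk
  have h1 : ((k : Int) - (n : Int)) ∉ PySem.Set.add crit idx := by
    simpa [pv_contains_eq] using hk
  have h2 : ((k : Int) - (n : Int)) ∉ crit :=
    fun hmem => h1 ((PySem.Set.mem_add _ _ _).mpr (Or.inl hmem))
  simpa [pv_contains_eq] using h2

theorem pvMu_add_le (n : Nat) (crit : List Int) (idx : Int) :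
    ((List.range (2 * n)).filter (fun k : Nat => ! (PySem.Set.add crit idx).contains ((k : Int) - (n : Int)))).length ≤
      ((List.range (2 * n)).filter (fun k : Nat => ! crit.contains ((k : Int) - (n : Int)))).length :=
  pv_filter_imp_le _ _ (pvMu_imp crit idx n) _

theorem pvMu_add_lt (n : Nat) (crit : List Int) (idx : Int) (hx : idx ∉ crit)
    (hlo : -(n : Int) ≤ idx) (hhi : idx < (n : Int)) :
    ((List.range (2 * n)).filter (fun k : Nat => ! (PySem.Set.add crit idx).contains ((k : Int) - (n : Int)))).length <
      ((List.range (2 * n)).filter (fun k : Nat => ! crit.contains ((k : Int) - (n : Int)))).length := by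
  apply pv_filter_imp_lt _ _ (pvMu_imp crit idx n) ((idx + (n : Int)).toNat)
  · have harg : (((idx + (n : Int)).toNat : Nat) : Int) - (n : Int) = idx := by omega
    rw [harg]
    have hmem : idx ∈ PySem.Set.add crit idx := (PySem.Set.mem_add _ _ _).mpr (Or.inr rfl)
    simp [pv_contains_eq, hmem]
  · have harg : (((idx + (n : Int)).toNat : Nat) : Int) - (n : Int) = idx := by omega
    rw [harg]
    simp [pv_contains_eq, hx]
  · rw [List.mem_range]; omega

theorem pv_dite_len (c : Prop) [Decidable c] (o : Option Int) :
    (dite c (fun _ => o.toList) (fun _ => [])).length ≤ 1 := by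
  split
  · cases o <;> simp
  · simp

theorem pv_ite_len (c : Prop) [Decidable c] (o : Option Int) :
    (ite c o.toList []).length ≤ 1 := by
  split
  · cases o <;> simp
  · simp

-- measure for the worklist loop
def pvMu (n : Nat) (wl crit : List Int) : Nat :=
  wl.length + 2 * ((List.range (2 * n)).filter (fun k : Nat => ! crit.contains ((k : Int) - (n : Int)))).length

-- ===== PORT A =====

-- one iteration of A's `for i, (ra, rb, op) in enumerate(fpan)` body in critical_gates
def pvStepA (st : List Int × List (Option Int) × List PvGI) (p : Int × Int × Int × String) :
    List Int × List (Option Int) × List PvGI :=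
  let iaT := PySem.List.pyGetD st.1 p.2.1 0
  let ibT := PySem.List.pyGetD st.1 p.2.2.1 0
  let iaS := PySem.List.pyGetD st.2.1 p.2.1 none
  let ibS := PySem.List.pyGetD st.2.1 p.2.2.1 none
  let start := max iaT ibT
  let gi' := st.2.2 ++ [(iaS, iaT, ibS, ibT, start)]
  let lat := (pvLat.get? p.2.2.2).getD (0, 0)   -- latencies[op]; default unreachable under Pre_ (KeyError)
  let rt1 := PySem.List.pySetD st.1 p.2.1 (start + lat.1)
  let rs1 := PySem.List.pySetD st.2.1 p.2.1 (some p.1)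
  let rt2 := PySem.List.pySetD rt1 p.2.2.1 (start + lat.2)
  let rs2 := PySem.List.pySetD rs1 p.2.2.1 (some p.1)
  (rt2, rs2, gi')

-- A's `while worklist:` loop (pop from the end; crit is a Python set)
def pvWlLoop (gi : List PvGI) (wl : List Int) (crit : PySem.Set Int) : PySem.Set Int :=
  if h : wl = [] then crit
  else
    let idx := wl.getLast h
    let wl' := wl.dropLast
    if crit.contains idx then pvWlLoop gi wl' crit
    else
      let crit' := PySem.Set.add crit idx
      match hg : PySem.List.pyGet? gi idx with
      | none => pvWlLoop gi wl' crit'      -- gate_info[idx] IndexError: unreachable (worklist holds gate indices)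
      | some g =>
          pvWlLoop gi
            ((wl' ++ (if g.2.1 = g.2.2.2.2 then g.1.toList else []))
                  ++ (if g.2.2.2.1 = g.2.2.2.2 then g.2.2.1.toList else []))
            crit'
termination_by pvMu gi.length wl crit
decreasing_by
  · have h1 : wl.dropLast.length = wl.length - 1 := List.length_dropLast
    have h2 : 1 ≤ wl.length := List.length_pos_iff.mpr h
    simp only [pvMu]; omega
  · have h1 : wl.dropLast.length = wl.length - 1 := List.length_dropLast
    have h2 : 1 ≤ wl.length := List.length_pos_iff.mpr h
    have hle := pvMu_add_le gi.length crit (wl.getLast h)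
    simp only [PySem.Set.contains] at hle
    simp only [pvMu]; omega
  · rename_i hnc
    have h1 : wl.dropLast.length = wl.length - 1 := List.length_dropLast
    have h2 : 1 ≤ wl.length := List.length_pos_iff.mpr h
    have hin : PySem.Raise.InRange gi.length (wl.getLast h) := by
      by_contra hcon
      rw [← PySem.List.pyGet?_eq_none_iff] at hcon
      rw [hcon] at hg; cases hg
    obtain ⟨hlo, hhi⟩ := hin
    have hx : wl.getLast h ∉ crit := by
      intro hmem
      exact hnc (by simpa [pv_contains_eq] using hmem)
    have hlt := pvMu_add_lt gi.length crit (wl.getLast h) hx hlo hhi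
    simp only [PySem.Set.contains] at hlt
    have hA1 := pv_dite_len (g.2.1 = g.2.2.2.2) g.1
    have hA2 := pv_ite_len (g.2.1 = g.2.2.2.2) g.1
    have hB1 := pv_dite_len (g.2.2.2.1 = g.2.2.2.2) g.2.2.1
    have hB2 := pv_ite_len (g.2.2.2.1 = g.2.2.2.2) g.2.2.1
    simp only [pvMu, List.length_append]
    omega

-- ts-count decrease of A's flip loop (cited by criticalize's decreasing_by)
theorem pv_flipA_dec (crit : PySem.Set Int) (l : List (Int × Int × String))
    (hne : (PySem.List.enumerate l).foldl
        (fun acc p => if p.2.2.2 = "ts" then acc ++ [(p.2.1, p.2.2.1, if crit.contains p.1 then "cts" else "ts")]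
                      else acc ++ [p.2]) [] ≠ l) :
    pvTsCount ((PySem.List.enumerate l).foldl
        (fun acc p => if p.2.2.2 = "ts" then acc ++ [(p.2.1, p.2.2.1, if crit.contains p.1 then "cts" else "ts")]
                      else acc ++ [p.2]) []) < pvTsCount l := by
  have hfold : ∀ (e : List (Int × Int × Int × String)) (acc : List (Int × Int × String)),
      e.foldl (fun acc p => if p.2.2.2 = "ts" then acc ++ [(p.2.1, p.2.2.1, if crit.contains p.1 then "cts" else "ts")]
                      else acc ++ [p.2]) acc
        = acc ++ e.map (fun p => if p.2.2.2 = "ts" then (p.2.1, p.2.2.1, if crit.contains p.1 then "cts" else "ts") else p.2) := by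
    intro e
    induction e with
    | nil => simp
    | cons a e ih =>
      intro acc
      rw [List.foldl_cons, ih, List.map_cons]
      by_cases hx : a.2.2.2 = "ts" <;> simp [hx]
  rw [hfold] at hne ⊢
  simp only [List.nil_append] at hne ⊢
  apply pv_flip_lt _ _ l 0 hne
  intro p
  by_cases ht : p.2.2.2 = "ts"
  · by_cases hm : p.1 ∈ crit
    · right; simp [ht, hm]
    · left
      rw [if_pos ht, if_neg (by simpa [pv_contains_eq] using hm)]
      rw [← ht]
  · left; simp [ht]

-- the function criticalize: A's code (critical_gates + flip + tail recursion)
def pvCriticalGatesA (fpan : List (Int × Int × String)) : PySem.Set Int :=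
  if fpan = [] then []
  else
    let nRegs := (PySem.List.max? (fpan.map (fun g => max g.1 g.2.1)) (fun x => x)).getD 0
    let st := (PySem.List.enumerate fpan).foldl pvStepA
      (List.replicate (nRegs + 1).toNat 0, List.replicate (nRegs + 1).toNat none, [])
    let maxT := (PySem.List.max? (PySem.List.slice st.1 (some 1) none) (fun x => x)).getD 0
    let wl := (PySem.List.pyRange 1 (nRegs + 1) 1).filterMap
      (fun r => if PySem.List.pyGetD st.1 r 0 = maxT then PySem.List.pyGetD st.2.1 r none else none)
    pvWlLoop st.2.2 wl []

def criticalize (fpan : List (Int × Int × String)) : List (Int × Int × String) :=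
  let crit := pvCriticalGatesA fpan
  let out := (PySem.List.enumerate fpan).foldl
    (fun acc p => if p.2.2.2 = "ts" then acc ++ [(p.2.1, p.2.2.1, if crit.contains p.1 then "cts" else "ts")]
                  else acc ++ [p.2]) []
  if _h : out ≠ fpan then criticalize out else out
termination_by pvTsCount fpan
decreasing_by exact pv_flipA_dec _ _ _h

-- ===== PORT B =====

-- one iteration of B's forward pass (dict-free: same registers, but per-gate predecessor lists)
def pvStepB (st : List Int × List (Option Int) × List (List Int)) (p : Int × Int × Int × String) :
    List Int × List (Option Int) × List (List Int) :=
  let ta := PySem.List.pyGetD st.1 p.2.1 0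
  let tb := PySem.List.pyGetD st.1 p.2.2.1 0
  let sa := PySem.List.pyGetD st.2.1 p.2.1 none
  let sb := PySem.List.pyGetD st.2.1 p.2.2.1 none
  let start := max ta tb
  let ps' := st.2.2 ++ [(if ta = start then sa.toList else []) ++ (if tb = start then sb.toList else [])]
  let lat := (pvLat.get? p.2.2.2).getD (0, 0)
  let rt1 := PySem.List.pySetD st.1 p.2.1 (start + lat.1)
  let rs1 := PySem.List.pySetD st.2.1 p.2.1 (some p.1)
  let rt2 := PySem.List.pySetD rt1 p.2.2.1 (start + lat.2)
  let rs2 := PySem.List.pySetD rs1 p.2.2.1 (some p.1)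
  (rt2, rs2, ps')

-- B's reverse sweep `for i in range(len(cur)-1, -1, -1): if i in crit: crit.update(preds[i])`
def pvScan (preds : List (List Int)) : Nat → PySem.Set Int → PySem.Set Int
  | 0, crit => crit
  | m + 1, crit =>
      pvScan preds m
        (if crit.contains (m : Int) then PySem.Set.update crit (PySem.List.pyGetD preds (m : Int) []) else crit)

-- ts-count decrease of B's flip comprehension (cited by pvAltLoop's decreasing_by)
theorem pv_flipB_dec (crit : PySem.Set Int) (l : List (Int × Int × String))
    (hne : (PySem.List.enumerate l).map
        (fun p => (p.2.1, p.2.2.1, if p.2.2.2 = "ts" ∧ crit.contains p.1 then "cts" else p.2.2.2)) ≠ l) :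
    pvTsCount ((PySem.List.enumerate l).map
        (fun p => (p.2.1, p.2.2.1, if p.2.2.2 = "ts" ∧ crit.contains p.1 then "cts" else p.2.2.2))) < pvTsCount l := by
  apply pv_flip_lt _ _ l 0 hne
  intro p
  by_cases hcond : p.2.2.2 = "ts" ∧ p.1 ∈ crit
  · right
    refine ⟨?_, hcond.1⟩
    simp [hcond.1, hcond.2]
  · left
    have hneg : ¬(p.2.2.2 = "ts" ∧ crit.contains p.1 = true) := by
      simpa [pv_contains_eq] using hcond
    rw [if_neg hneg]

-- B's `while True:` fixpoint loop, forward pass and reverse sweep inlined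
def pvAltLoop (cur : List (Int × Int × String)) : List (Int × Int × String) :=
  if cur = [] then cur
  else
    let nRegs := (PySem.List.max? (cur.map (fun g => max g.1 g.2.1)) (fun x => x)).getD 0
    let st := (PySem.List.enumerate cur).foldl pvStepB
      (List.replicate (nRegs + 1).toNat 0, List.replicate (nRegs + 1).toNat none, [])
    let maxT := (PySem.List.max? (PySem.List.slice st.1 (some 1) none) (fun x => x)).getD 0
    let crit0 := PySem.Set.ofList ((PySem.List.pyRange 1 (nRegs + 1) 1).filterMap
      (fun r => if PySem.List.pyGetD st.1 r 0 = maxT then PySem.List.pyGetD st.2.1 r none else none))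
    let crit := pvScan st.2.2 cur.length crit0
    let nxt := (PySem.List.enumerate cur).map
      (fun p => (p.2.1, p.2.2.1, if p.2.2.2 = "ts" ∧ crit.contains p.1 then "cts" else p.2.2.2))
    if _h : nxt = cur then cur else pvAltLoop nxt
termination_by pvTsCount cur
decreasing_by exact pv_flipB_dec _ _ _h

def criticalize_alt (fpan : List (Int × Int × String)) : List (Int × Int × String) :=
  pvAltLoop fpan

-- ===== PRECONDITION & SPEC =====

-- n_regs of the list (the maximum register index; 0 for the empty list)
def pvNRegs (fpan : List (Int × Int × String)) : Int :=
  fpan.foldl (fun m g => max m (max g.1 g.2.1)) 0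

-- Pre_ excludes exactly the inputs where Python A raises: an op outside the latency table
-- (KeyError), a register index outside [-(n_regs+1), n_regs] (IndexError), and nonempty
-- inputs whose registers are all ≤ 0 (max of the empty reg_time[1:], ValueError).
def Pre_criticalize (fpan : List (Int × Int × String)) : Prop :=
  (∀ g ∈ fpan, g.2.2 = "ts" ∨ g.2.2 = "fts" ∨ g.2.2 = "add" ∨ g.2.2 = "cts") ∧
  (fpan ≠ [] →
    (∃ g ∈ fpan, 1 ≤ max g.1 g.2.1) ∧
    (∀ g ∈ fpan, -(pvNRegs fpan + 1) ≤ g.1 ∧ g.1 ≤ pvNRegs fpan ∧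
                 -(pvNRegs fpan + 1) ≤ g.2.1 ∧ g.2.1 ≤ pvNRegs fpan))
instance (fpan : List (Int × Int × String)) : Decidable (Pre_criticalize fpan) := by
  unfold Pre_criticalize; infer_instance

def pvWitness_criticalize : (List (Int × Int × String)) := [(1, 2, "ts")]

def Spec_criticalize (fpan : List (Int × Int × String)) (out : List (Int × Int × String)) : Prop :=
  out = criticalize_alt fpan
instance (fpan : List (Int × Int × String)) (out : List (Int × Int × String)) : Decidable (Spec_criticalize fpan out) := by
  unfold Spec_criticalize; infer_instance

-- ===== CLAIM (what is proved, stated in full; the proofs are below) =====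
def Claim_equal_criticalize : Prop := ∀ (fpan : List (Int × Int × String)), Dom_criticalize fpan → Pre_criticalize fpan → Spec_criticalize fpan (criticalize fpan)

-- ===== LEMMAS AND PROOFS =====

-- default gate-info record (no predecessors)
def pvGI0 : PvGI := (none, 0, none, 0, 0)

-- the predecessor list encoded by a gate-info record (exactly A's two guarded pushes)
def pvGIpreds (g : PvGI) : List Int :=
  (if g.2.1 = g.2.2.2.2 then g.1.toList else []) ++ (if g.2.2.2.1 = g.2.2.2.2 then g.2.2.1.toList else [])

-- edge function: critical predecessors of gate idx according to the gate-info table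
def pvPredsA (gi : List PvGI) (idx : Int) : List Int :=
  match PySem.List.pyGet? gi idx with
  | none => []
  | some g => pvGIpreds g

-- backward reachability from the root gates along critical edges
inductive pvReach (roots : List Int) (E : Int → List Int) : Int → Prop
  | root (i : Int) : i ∈ roots → pvReach roots E i
  | step (i j : Int) : pvReach roots E j → i ∈ E j → pvReach roots E i

theorem pv_mem_pySetD {α : Type} (xs : List α) (i : Int) (v a : α)
    (h : a ∈ PySem.List.pySetD xs i v) : a ∈ xs ∨ a = v := by
  unfold PySem.List.pySetD PySem.List.pySet? at h
  cases hk : PySem.List.pyIdx? xs.length i with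
  | none => rw [hk] at h; simpa using Or.inl h
  | some k =>
    rw [hk] at h
    simp only [Option.map_some, Option.getD_some] at h
    exact List.mem_or_eq_of_mem_set h

theorem pv_pyGetD_or {α : Type} (xs : List α) (i : Int) (d : α) :
    PySem.List.pyGetD xs i d ∈ xs ∨ PySem.List.pyGetD xs i d = d := by
  unfold PySem.List.pyGetD
  cases hk : PySem.List.pyGet? xs i with
  | none => simp
  | some a => simpa using Or.inl (PySem.List.mem_of_pyGet?_eq_some xs hk)

-- B's forward pass is A's forward pass carrying `pvGIpreds` of each gate-info record
theorem pv_stepAB (rt : List Int) (rs : List (Option Int)) (gi : List PvGI) (q : Int × Int × Int × String) :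
    pvStepB (rt, rs, gi.map pvGIpreds) q =
      ((pvStepA (rt, rs, gi) q).1, (pvStepA (rt, rs, gi) q).2.1,
        (pvStepA (rt, rs, gi) q).2.2.map pvGIpreds) := by
  simp [pvStepA, pvStepB, pvGIpreds]

theorem pv_lockstep (l : List (Int × Int × String)) :
    ∀ (s : Int) (rt : List Int) (rs : List (Option Int)) (gi : List PvGI),
      (PySem.List.enumerate l s).foldl pvStepB (rt, rs, gi.map pvGIpreds)
        = (((PySem.List.enumerate l s).foldl pvStepA (rt, rs, gi)).1,
           ((PySem.List.enumerate l s).foldl pvStepA (rt, rs, gi)).2.1,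
           ((PySem.List.enumerate l s).foldl pvStepA (rt, rs, gi)).2.2.map pvGIpreds) := by
  induction l with
  | nil => intro s rt rs gi; simp [PySem.List.enumerate_nil]
  | cons x xs ih =>
    intro s rt rs gi
    rw [PySem.List.enumerate_cons, List.foldl_cons, List.foldl_cons, pv_stepAB]
    have := ih (s + 1) (pvStepA (rt, rs, gi) (s, x)).1 (pvStepA (rt, rs, gi) (s, x)).2.1
      (pvStepA (rt, rs, gi) (s, x)).2.2
    simpa using this

-- invariant of A's forward pass: sources are earlier gate indices
def pvInvA (st : List Int × List (Option Int) × List PvGI) : Prop :=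
  (∀ v : Int, some v ∈ st.2.1 → 0 ≤ v ∧ v < (st.2.2.length : Int)) ∧
  (∀ (j : Nat) (x : Int), x ∈ pvGIpreds (st.2.2.getD j pvGI0) → 0 ≤ x ∧ x < (j : Int))

theorem pv_stepA_inv (st : List Int × List (Option Int) × List PvGI) (x : Int × Int × String)
    (h : pvInvA st) :
    pvInvA (pvStepA st ((st.2.2.length : Int), x)) ∧
      (pvStepA st ((st.2.2.length : Int), x)).2.2.length = st.2.2.length + 1 := by
  obtain ⟨hrs, hgi⟩ := h
  obtain ⟨rt, rs, gi⟩ := st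
  simp only at hrs hgi
  have hlen : (pvStepA (rt, rs, gi) ((gi.length : Int), x)).2.2.length = gi.length + 1 := by
    simp [pvStepA]
  refine ⟨⟨?_, ?_⟩, hlen⟩
  · intro v hv
    rw [hlen]
    simp only [pvStepA] at hv
    rcases pv_mem_pySetD _ _ _ _ hv with hv1 | hv1
    · rcases pv_mem_pySetD _ _ _ _ hv1 with hv2 | hv2
      · have := hrs v hv2
        push_cast
        omega
      · have hveq : v = (gi.length : Int) := Option.some.inj hv2
        push_cast
        omega
    · have hveq : v = (gi.length : Int) := Option.some.inj hv1
      push_cast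
      omega
  · intro j y hy
    simp only [pvStepA] at hy
    rcases lt_trichotomy j gi.length with hj | hj | hj
    · rw [List.getD_append _ _ _ j hj] at hy
      exact hgi j y hy
    · subst hj
      rw [List.getD_append_right _ _ _ _ (le_refl _), Nat.sub_self] at hy
      simp only [List.getD_cons_zero] at hy
      simp only [pvGIpreds, List.mem_append] at hy
      have hfield : ∀ (r : Int), PySem.List.pyGetD rs r none = some y → 0 ≤ y ∧ y < (gi.length : Int) := by
        intro r hr
        rcases pv_pyGetD_or rs r none with hmem | hdef
        · rw [hr] at hmem
          exact hrs y hmem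
        · rw [hr] at hdef
          cases hdef
      rcases hy with hy | hy
      · split at hy
        · rw [Option.mem_toList] at hy
          exact hfield _ hy
        · cases hy
      · split at hy
        · rw [Option.mem_toList] at hy
          exact hfield _ hy
        · cases hy
    · rw [List.getD_append_right _ _ _ _ (by omega)] at hy
      rw [List.getD_eq_default _ _ (by simp; omega)] at hy
      simp [pvGIpreds, pvGI0] at hy

theorem pv_foldA_inv (l : List (Int × Int × String)) :
    ∀ (st : List Int × List (Option Int) × List PvGI), pvInvA st →
      pvInvA ((PySem.List.enumerate l ((st.2.2.length : Nat) : Int)).foldl pvStepA st) ∧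
        ((PySem.List.enumerate l ((st.2.2.length : Nat) : Int)).foldl pvStepA st).2.2.length
          = st.2.2.length + l.length := by
  induction l with
  | nil => intro st h; simp [PySem.List.enumerate_nil, h]
  | cons x xs ih =>
    intro st h
    rw [PySem.List.enumerate_cons, List.foldl_cons]
    obtain ⟨h1, h2⟩ := pv_stepA_inv st x h
    have h3 := ih (pvStepA st ((st.2.2.length : Int), x)) h1
    rw [h2] at h3
    have hc : ((st.2.2.length + 1 : Nat) : Int) = (st.2.2.length : Int) + 1 := by push_cast; ring
    rw [hc] at h3
    obtain ⟨ha, hb⟩ := h3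
    exact ⟨ha, by rw [hb, List.length_cons]; omega⟩

-- === A's worklist loop computes backward reachability ===

theorem pv_wl_mono (gi : List PvGI) :
    ∀ (wl crit : List Int), ∀ i ∈ crit, i ∈ pvWlLoop gi wl crit := by
  intro wl crit
  induction wl, crit using pvWlLoop.induct gi with
  | case1 crit =>
    intro i hi
    rw [pvWlLoop]
    simpa using hi
  | case2 wl crit h idx wl' hc ih =>
    intro i hi
    rw [pvWlLoop, dif_neg h, if_pos hc]
    exact ih i hi
  | case3 wl crit h idx wl' hnc crit' hg ih =>
    intro i hi
    rw [pvWlLoop, dif_neg h, if_neg hnc]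
    split
    · rename_i h'
      exact ih i ((PySem.Set.mem_add _ _ _).mpr (Or.inl hi))
    · rename_i g2 h'
      rw [hg] at h'
      cases h'
  | case4 wl crit h idx wl' hnc crit' g hg ih =>
    intro i hi
    rw [pvWlLoop, dif_neg h, if_neg hnc]
    split
    · rename_i h'
      rw [hg] at h'
      cases h'
    · rename_i g2 h'
      rw [hg] at h'
      injection h' with h''
      subst h''
      exact ih i ((PySem.Set.mem_add _ _ _).mpr (Or.inl hi))

theorem pv_wl_wl (gi : List PvGI) :
    ∀ (wl crit : List Int), ∀ i ∈ wl, i ∈ pvWlLoop gi wl crit := by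
  intro wl crit
  induction wl, crit using pvWlLoop.induct gi with
  | case1 crit =>
    intro i hi
    cases hi
  | case2 wl crit h idx wl' hc ih =>
    intro i hi
    rw [pvWlLoop, dif_neg h, if_pos hc]
    rw [← List.dropLast_concat_getLast h, List.mem_append, List.mem_singleton] at hi
    rcases hi with hi | hi
    · exact ih i hi
    · subst hi
      exact pv_wl_mono gi _ _ _ ((PySem.Set.contains_iff _ _).mp hc)
  | case3 wl crit h idx wl' hnc crit' hg ih =>
    intro i hi
    rw [pvWlLoop, dif_neg h, if_neg hnc]
    rw [← List.dropLast_concat_getLast h, List.mem_append, List.mem_singleton] at hi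
    split
    · rename_i h'
      rcases hi with hi | hi
      · exact ih i hi
      · subst hi
        exact pv_wl_mono gi _ _ _ ((PySem.Set.mem_add _ _ _).mpr (Or.inr rfl))
    · rename_i g2 h'
      rw [hg] at h'
      cases h'
  | case4 wl crit h idx wl' hnc crit' g hg ih =>
    intro i hi
    rw [pvWlLoop, dif_neg h, if_neg hnc]
    rw [← List.dropLast_concat_getLast h, List.mem_append, List.mem_singleton] at hi
    split
    · rename_i h'
      rw [hg] at h'
      cases h'
    · rename_i g2 h'
      rw [hg] at h'
      injection h' with h''
      subst h''
      rcases hi with hi | hi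
      · exact ih i (by
          rw [List.mem_append, List.mem_append]
          exact Or.inl (Or.inl hi))
      · subst hi
        exact pv_wl_mono gi _ _ _ ((PySem.Set.mem_add _ _ _).mpr (Or.inr rfl))

theorem pv_wl_closed (gi : List PvGI) :
    ∀ (wl crit : List Int),
      (∀ j ∈ crit, ∀ x ∈ pvPredsA gi j, x ∈ crit ∨ x ∈ wl) →
      ∀ j ∈ pvWlLoop gi wl crit, ∀ x ∈ pvPredsA gi j, x ∈ pvWlLoop gi wl crit := by
  intro wl crit
  induction wl, crit using pvWlLoop.induct gi with
  | case1 crit =>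
    intro hinv j hj x hx
    rw [pvWlLoop] at hj ⊢
    simp only [dif_pos rfl] at hj ⊢
    rcases hinv j hj x hx with h | h
    · exact h
    · cases h
  | case2 wl crit h idx wl' hc ih =>
    intro hinv
    rw [pvWlLoop, dif_neg h, if_pos hc]
    apply ih
    intro j hj x hx
    rcases hinv j hj x hx with hcase | hcase
    · exact Or.inl hcase
    · rw [← List.dropLast_concat_getLast h, List.mem_append, List.mem_singleton] at hcase
      rcases hcase with hcase | hcase
      · exact Or.inr hcase
      · subst hcase
        exact Or.inl ((PySem.Set.contains_iff _ _).mp hc)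
  | case3 wl crit h idx wl' hnc crit' hg ih =>
    intro hinv
    rw [pvWlLoop, dif_neg h, if_neg hnc]
    split
    · rename_i h'
      apply ih
      intro j hj x hx
      rcases (PySem.Set.mem_add _ _ _).mp hj with hj1 | hj1
      · rcases hinv j hj1 x hx with hcase | hcase
        · exact Or.inl ((PySem.Set.mem_add _ _ _).mpr (Or.inl hcase))
        · rw [← List.dropLast_concat_getLast h, List.mem_append, List.mem_singleton] at hcase
          rcases hcase with hcase | hcase
          · exact Or.inr hcase
          · subst hcase
            exact Or.inl ((PySem.Set.mem_add _ _ _).mpr (Or.inr rfl))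
      · subst hj1
        unfold pvPredsA at hx
        rw [hg] at hx
        cases hx
    · rename_i g2 h'
      rw [hg] at h'
      cases h'
  | case4 wl crit h idx wl' hnc crit' g hg ih =>
    intro hinv
    rw [pvWlLoop, dif_neg h, if_neg hnc]
    split
    · rename_i h'
      rw [hg] at h'
      cases h'
    · rename_i g2 h'
      rw [hg] at h'
      injection h' with h''
      subst h''
      apply ih
      intro j hj x hx
      rcases (PySem.Set.mem_add _ _ _).mp hj with hj1 | hj1
      · rcases hinv j hj1 x hx with hcase | hcase
        · exact Or.inl ((PySem.Set.mem_add _ _ _).mpr (Or.inl hcase))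
        · rw [← List.dropLast_concat_getLast h, List.mem_append, List.mem_singleton] at hcase
          rcases hcase with hcase | hcase
          · refine Or.inr ?_
            rw [List.mem_append, List.mem_append]
            exact Or.inl (Or.inl hcase)
          · subst hcase
            exact Or.inl ((PySem.Set.mem_add _ _ _).mpr (Or.inr rfl))
      · subst hj1
        unfold pvPredsA at hx
        rw [hg] at hx
        refine Or.inr ?_
        rw [List.mem_append]
        simp only [pvGIpreds, List.mem_append] at hx
        rcases hx with hx | hx
        · refine Or.inl ?_
          rw [List.mem_append]
          refine Or.inr ?_
          simpa using hx
        · refine Or.inr ?_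
          simpa using hx

theorem pv_wl_sound (gi : List PvGI) (R : Int → Prop)
    (hR : ∀ j x, R j → x ∈ pvPredsA gi j → R x) :
    ∀ (wl crit : List Int),
      (∀ j ∈ wl, R j) → (∀ j ∈ crit, R j) → ∀ j ∈ pvWlLoop gi wl crit, R j := by
  intro wl crit
  induction wl, crit using pvWlLoop.induct gi with
  | case1 crit =>
    intro _ hcrit j hj
    rw [pvWlLoop] at hj
    simp only [dif_pos rfl] at hj
    exact hcrit j hj
  | case2 wl crit h idx wl' hc ih =>
    intro hwl hcrit
    rw [pvWlLoop, dif_neg h, if_pos hc]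
    exact ih (fun j hj => hwl j (by
      rw [← List.dropLast_concat_getLast h, List.mem_append]; exact Or.inl hj)) hcrit
  | case3 wl crit h idx wl' hnc crit' hg ih =>
    intro hwl hcrit
    rw [pvWlLoop, dif_neg h, if_neg hnc]
    have hidx : R (wl.getLast h) := hwl _ (List.getLast_mem h)
    split
    · rename_i h'
      refine ih (fun j hj => hwl j (by
        rw [← List.dropLast_concat_getLast h, List.mem_append]; exact Or.inl hj)) ?_
      intro j hj
      rcases (PySem.Set.mem_add _ _ _).mp hj with hj1 | hj1
      · exact hcrit j hj1
      · subst hj1; exact hidx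
    · rename_i g2 h'
      rw [hg] at h'
      cases h'
  | case4 wl crit h idx wl' hnc crit' g hg ih =>
    intro hwl hcrit
    rw [pvWlLoop, dif_neg h, if_neg hnc]
    have hidx : R (wl.getLast h) := hwl _ (List.getLast_mem h)
    split
    · rename_i h'
      rw [hg] at h'
      cases h'
    · rename_i g2 h'
      rw [hg] at h'
      injection h' with h''
      subst h''
      have hpush : ∀ x, x ∈ pvGIpreds g → R x := by
        intro x hx
        refine hR _ x hidx ?_
        unfold pvPredsA
        rw [hg]
        exact hx
      refine ih ?_ ?_
      · intro j hj
        rw [List.mem_append, List.mem_append] at hj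
        rcases hj with (hj | hj) | hj
        · exact hwl j (by
            rw [← List.dropLast_concat_getLast h, List.mem_append]; exact Or.inl hj)
        · exact hpush j (by
            simp only [pvGIpreds, List.mem_append]
            exact Or.inl (by simpa using hj))
        · exact hpush j (by
            simp only [pvGIpreds, List.mem_append]
            exact Or.inr (by simpa using hj))
      · intro j hj
        rcases (PySem.Set.mem_add _ _ _).mp hj with hj1 | hj1
        · exact hcrit j hj1
        · subst hj1; exact hidx

theorem pv_wl_char (gi : List PvGI) (roots : List Int) :
    ∀ i : Int, i ∈ pvWlLoop gi roots [] ↔ pvReach roots (pvPredsA gi) i := by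
  intro i
  constructor
  · exact fun h => pv_wl_sound gi (pvReach roots (pvPredsA gi))
      (fun j x hj hx => pvReach.step x j hj hx) roots []
      (fun j hj => pvReach.root j hj) (fun j hj => by cases hj) i h
  · intro h
    induction h with
    | root j hj => exact pv_wl_wl gi roots [] j hj
    | step x j hj hx ihj =>
      exact pv_wl_closed gi roots [] (fun j hj => by cases hj) j ihj x hx


-- === B's reverse sweep computes the same reachability ===

theorem pv_ps_eq (gi : List PvGI) (m : Nat) :
    PySem.List.pyGetD (gi.map pvGIpreds) ((m : Nat) : Int) [] = pvPredsA gi ((m : Nat) : Int) := by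
  rw [PySem.List.pyGetD_natCast]
  unfold pvPredsA
  rw [PySem.List.pyGet?_natCast]
  by_cases h : m < gi.length
  · rw [List.getD_eq_getElem?_getD, List.getElem?_map, List.getElem?_eq_getElem h]
    simp
  · rw [List.getD_eq_default _ _ (by simpa using Nat.le_of_not_lt h)]
    rw [List.getElem?_eq_none (Nat.le_of_not_lt h)]

theorem pv_scan_mono (ps : List (List Int)) :
    ∀ (m : Nat) (crit : PySem.Set Int), ∀ i ∈ crit, i ∈ pvScan ps m crit := by
  intro m
  induction m with
  | zero => intro crit i hi; exact hi
  | succ m ih =>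
    intro crit i hi
    rw [pvScan]
    apply ih
    split
    · rw [PySem.Set.mem_update]; exact Or.inl hi
    · exact hi

theorem pv_scan_sub (ps : List (List Int)) :
    ∀ (m : Nat) (crit : PySem.Set Int), ∀ i ∈ pvScan ps m crit,
      i ∈ crit ∨ ∃ k : Nat, k < m ∧ i ∈ PySem.List.pyGetD ps ((k : Nat) : Int) [] := by
  intro m
  induction m with
  | zero => intro crit i hi; exact Or.inl hi
  | succ m ih =>
    intro crit i hi
    rw [pvScan] at hi
    rcases ih _ i hi with h | ⟨k, hk, hik⟩
    · by_cases hc : crit.contains ((m : Nat) : Int)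
      · rw [if_pos hc, PySem.Set.mem_update] at h
        rcases h with h | h
        · exact Or.inl h
        · exact Or.inr ⟨m, Nat.lt_succ_self m, h⟩
      · rw [if_neg hc] at h
        exact Or.inl h
    · exact Or.inr ⟨k, Nat.lt_succ_of_lt hk, hik⟩

theorem pv_scan_sound (ps : List (List Int)) (R : Int → Prop)
    (hR : ∀ (j : Nat) (x : Int), R ((j : Nat) : Int) → x ∈ PySem.List.pyGetD ps ((j : Nat) : Int) [] → R x) :
    ∀ (m : Nat) (crit : PySem.Set Int), (∀ i ∈ crit, R i) → ∀ i ∈ pvScan ps m crit, R i := by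
  intro m
  induction m with
  | zero => intro crit hcrit i hi; exact hcrit i hi
  | succ m ih =>
    intro crit hcrit i hi
    rw [pvScan] at hi
    refine ih _ ?_ i hi
    intro x hx
    by_cases hc : crit.contains ((m : Nat) : Int)
    · rw [if_pos hc, PySem.Set.mem_update] at hx
      rcases hx with hx | hx
      · exact hcrit x hx
      · exact hR m x (hcrit _ ((PySem.Set.contains_iff crit _).mp hc)) hx
    · rw [if_neg hc] at hx
      exact hcrit x hx

theorem pv_scan_closed (ps : List (List Int))
    (hb : ∀ (k : Nat) (x : Int), x ∈ PySem.List.pyGetD ps ((k : Nat) : Int) [] → 0 ≤ x ∧ x < (k : Int)) :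
    ∀ (m : Nat) (crit : PySem.Set Int) (j : Nat), j < m → ((j : Nat) : Int) ∈ pvScan ps m crit →
      ∀ x ∈ PySem.List.pyGetD ps ((j : Nat) : Int) [], x ∈ pvScan ps m crit := by
  intro m
  induction m with
  | zero => intro crit j hj; omega
  | succ m ih =>
    intro crit j hj hmem x hx
    rw [pvScan] at hmem ⊢
    by_cases hjm : j < m
    · exact ih _ j hjm hmem x hx
    · have hjeq : j = m := by omega
      subst hjeq
      -- j = m: m is not added during the inner sweep (all additions are < m)
      have hmem' : ((j : Nat) : Int) ∈
          (if crit.contains ((j : Nat) : Int) then PySem.Set.update crit (PySem.List.pyGetD ps ((j : Nat) : Int) []) else crit) := by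
        rcases pv_scan_sub ps j _ _ hmem with h | ⟨k, hk, hik⟩
        · exact h
        · have := (hb k _ hik).2
          omega
      by_cases hc : crit.contains ((j : Nat) : Int)
      · apply pv_scan_mono
        rw [if_pos hc, PySem.Set.mem_update]
        exact Or.inr hx
      · rw [if_neg hc] at hmem'
        exact absurd ((PySem.Set.contains_iff crit _).mpr hmem') hc

theorem pv_reach_range (n : Nat) (roots : List Int) (E : Int → List Int)
    (hroots : ∀ i ∈ roots, 0 ≤ i ∧ i < (n : Int))
    (hb : ∀ (j x : Int), 0 ≤ j → x ∈ E j → 0 ≤ x ∧ x < j) :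
    ∀ i, pvReach roots E i → 0 ≤ i ∧ i < (n : Int) := by
  intro i h
  induction h with
  | root j hj => exact hroots j hj
  | step x j hj hx ihj =>
    have := hb j x ihj.1 hx
    omega

theorem pv_predsA_bound (gi : List PvGI)
    (hgi : ∀ (j : Nat) (x : Int), x ∈ pvGIpreds (gi.getD j pvGI0) → 0 ≤ x ∧ x < (j : Int)) :
    ∀ (j x : Int), 0 ≤ j → x ∈ pvPredsA gi j → 0 ≤ x ∧ x < j := by
  intro j x hj hx
  unfold pvPredsA at hx
  cases hk : PySem.List.pyGet? gi j with
  | none => rw [hk] at hx; cases hx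
  | some g =>
    rw [hk] at hx
    rw [PySem.List.pyGet?_of_nonneg gi hj] at hk
    have hlt : j.toNat < gi.length := by
      by_contra hcon
      rw [List.getElem?_eq_none (Nat.le_of_not_lt hcon)] at hk
      cases hk
    have hgd : gi.getD j.toNat pvGI0 = g := by
      rw [List.getD_eq_getElem?_getD, hk]; rfl
    have := hgi j.toNat x (by rw [hgd]; exact hx)
    omega

theorem pv_scan_char (gi : List PvGI) (roots : List Int) (n : Nat)
    (hn : n = gi.length)
    (hgi : ∀ (j : Nat) (x : Int), x ∈ pvGIpreds (gi.getD j pvGI0) → 0 ≤ x ∧ x < (j : Int))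
    (hroots : ∀ i ∈ roots, 0 ≤ i ∧ i < (n : Int)) :
    ∀ i : Int, i ∈ pvScan (gi.map pvGIpreds) n (PySem.Set.ofList roots) ↔
      pvReach roots (pvPredsA gi) i := by
  have hb : ∀ (k : Nat) (x : Int), x ∈ PySem.List.pyGetD (gi.map pvGIpreds) ((k : Nat) : Int) [] → 0 ≤ x ∧ x < (k : Int) := by
    intro k x hx
    rw [pv_ps_eq] at hx
    exact pv_predsA_bound gi hgi (k : Int) x (by positivity) hx
  intro i
  constructor
  · intro h
    refine pv_scan_sound (gi.map pvGIpreds) (pvReach roots (pvPredsA gi)) ?_ n _ ?_ i h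
    · intro j x hj hx
      rw [pv_ps_eq] at hx
      exact pvReach.step x _ hj hx
    · intro v hv
      exact pvReach.root v ((PySem.Set.mem_ofList roots v).mp hv)
  · intro h
    induction h with
    | root j hj => exact pv_scan_mono _ n _ j ((PySem.Set.mem_ofList roots j).mpr hj)
    | step x j hj hx ihj =>
      have hjr : 0 ≤ j ∧ j < (n : Int) :=
        pv_reach_range n roots (pvPredsA gi) hroots (pv_predsA_bound gi hgi) j hj
      have hcast : ((j.toNat : Nat) : Int) = j := Int.toNat_of_nonneg hjr.1
      have hjn : j.toNat < n := by omega
      have := pv_scan_closed (gi.map pvGIpreds) hb n _ j.toNat hjn (by rw [hcast]; exact ihj) x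
      apply this
      rw [pv_ps_eq, hcast]
      exact hx

-- === the two passes compute the same critical set and the same flipped list ===

def pvNR (l : List (Int × Int × String)) : Int :=
  (PySem.List.max? (l.map (fun g => max g.1 g.2.1)) (fun x => x)).getD 0

def pvStA (l : List (Int × Int × String)) : List Int × List (Option Int) × List PvGI :=
  (PySem.List.enumerate l).foldl pvStepA
    (List.replicate (pvNR l + 1).toNat 0, List.replicate (pvNR l + 1).toNat none, [])

def pvStB (l : List (Int × Int × String)) : List Int × List (Option Int) × List (List Int) :=
  (PySem.List.enumerate l).foldl pvStepB
    (List.replicate (pvNR l + 1).toNat 0, List.replicate (pvNR l + 1).toNat none, [])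

def pvMaxT (l : List (Int × Int × String)) : Int :=
  (PySem.List.max? (PySem.List.slice (pvStA l).1 (some 1) none) (fun x => x)).getD 0

def pvRoots (l : List (Int × Int × String)) : List Int :=
  (PySem.List.pyRange 1 (pvNR l + 1) 1).filterMap
    (fun r => if PySem.List.pyGetD (pvStA l).1 r 0 = pvMaxT l then PySem.List.pyGetD (pvStA l).2.1 r none else none)

def pvMaxTB (l : List (Int × Int × String)) : Int :=
  (PySem.List.max? (PySem.List.slice (pvStB l).1 (some 1) none) (fun x => x)).getD 0

def pvRootsB (l : List (Int × Int × String)) : List Int :=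
  (PySem.List.pyRange 1 (pvNR l + 1) 1).filterMap
    (fun r => if PySem.List.pyGetD (pvStB l).1 r 0 = pvMaxTB l then PySem.List.pyGetD (pvStB l).2.1 r none else none)

theorem pvStB_eq (l : List (Int × Int × String)) :
    pvStB l = ((pvStA l).1, (pvStA l).2.1, (pvStA l).2.2.map pvGIpreds) := by
  unfold pvStA pvStB
  have := pv_lockstep l 0 (List.replicate (pvNR l + 1).toNat 0) (List.replicate (pvNR l + 1).toNat none) []
  simpa using this

theorem pvRootsB_eq (l : List (Int × Int × String)) : pvRootsB l = pvRoots l := by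
  unfold pvRootsB pvRoots pvMaxTB pvMaxT
  rw [pvStB_eq]

theorem pvInvA_stA (l : List (Int × Int × String)) :
    pvInvA (pvStA l) ∧ (pvStA l).2.2.length = l.length := by
  have h0 : pvInvA (List.replicate (pvNR l + 1).toNat (0 : Int), List.replicate (pvNR l + 1).toNat (none : Option Int), ([] : List PvGI)) := by
    constructor
    · intro v hv
      simp only at hv
      have := List.eq_of_mem_replicate hv
      cases this
    · intro j x hx
      simp only [List.getD_nil, pvGI0, pvGIpreds] at hx
      simp at hx
  have := pv_foldA_inv l _ h0
  simpa [pvStA] using this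

theorem pv_crit_iff (l : List (Int × Int × String)) (hl : l ≠ []) :
    ∀ i : Int, i ∈ pvCriticalGatesA l ↔ i ∈ pvScan (pvStB l).2.2 l.length (PySem.Set.ofList (pvRootsB l)) := by
  rw [pvRootsB_eq]
  obtain ⟨⟨hrs, hgi⟩, hlen⟩ := pvInvA_stA l
  have hA : pvCriticalGatesA l = pvWlLoop (pvStA l).2.2 (pvRoots l) [] := by
    unfold pvCriticalGatesA
    rw [if_neg hl]
    rfl
  have hroots : ∀ i ∈ pvRoots l, 0 ≤ i ∧ i < (l.length : Int) := by
    intro i hi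
    unfold pvRoots at hi
    rw [List.mem_filterMap] at hi
    obtain ⟨r, _, hcond⟩ := hi
    by_cases hc : PySem.List.pyGetD (pvStA l).1 r 0 = pvMaxT l
    · rw [if_pos hc] at hcond
      rcases pv_pyGetD_or (pvStA l).2.1 r none with hmem | hdef
      · rw [hcond] at hmem
        have := hrs i hmem
        omega
      · rw [hcond] at hdef
        cases hdef
    · rw [if_neg hc] at hcond
      cases hcond
  intro i
  rw [hA, pvStB_eq]
  rw [pv_wl_char]
  rw [pv_scan_char (pvStA l).2.2 (pvRoots l) l.length hlen.symm hgi hroots]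

-- A's flip loop as a map, and the two flipped lists
def pvOutA (l : List (Int × Int × String)) : List (Int × Int × String) :=
  (PySem.List.enumerate l).foldl
    (fun acc p => if p.2.2.2 = "ts" then acc ++ [(p.2.1, p.2.2.1, if (pvCriticalGatesA l).contains p.1 then "cts" else "ts")]
                  else acc ++ [p.2]) []

def pvNxtB (l : List (Int × Int × String)) : List (Int × Int × String) :=
  (PySem.List.enumerate l).map
    (fun p => (p.2.1, p.2.2.1,
      if p.2.2.2 = "ts" ∧ (pvScan (pvStB l).2.2 l.length (PySem.Set.ofList (pvRootsB l))).contains p.1 then "cts" else p.2.2.2))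

theorem pv_pass_eq (l : List (Int × Int × String)) (hl : l ≠ []) : pvOutA l = pvNxtB l := by
  have hfold : ∀ (crit : PySem.Set Int) (e : List (Int × Int × Int × String)) (acc : List (Int × Int × String)),
      e.foldl (fun acc p => if p.2.2.2 = "ts" then acc ++ [(p.2.1, p.2.2.1, if crit.contains p.1 then "cts" else "ts")]
                      else acc ++ [p.2]) acc
        = acc ++ e.map (fun p => if p.2.2.2 = "ts" then (p.2.1, p.2.2.1, if crit.contains p.1 then "cts" else "ts") else p.2) := by
    intro crit e
    induction e with
    | nil => simp
    | cons a e ih =>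
      intro acc
      rw [List.foldl_cons, ih, List.map_cons]
      by_cases hx : a.2.2.2 = "ts" <;> simp [hx]
  unfold pvOutA pvNxtB
  rw [hfold]
  rw [List.nil_append]
  apply List.map_congr_left
  intro p _
  have hiff := pv_crit_iff l hl p.1
  by_cases ht : p.2.2.2 = "ts"
  · by_cases hm : p.1 ∈ pvCriticalGatesA l
    · have hm' : p.1 ∈ pvScan (pvStB l).2.2 l.length (PySem.Set.ofList (pvRootsB l)) := hiff.mp hm
      simp [ht, hm, hm']
    · have hm' : p.1 ∉ pvScan (pvStB l).2.2 l.length (PySem.Set.ofList (pvRootsB l)) := fun h => hm (hiff.mpr h)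
      simp [ht, hm, hm']
  · simp [ht]

-- one-step unfoldings of the two fixpoint recursions
theorem pv_criticalize_eq (l : List (Int × Int × String)) :
    criticalize l = if _h : pvOutA l ≠ l then criticalize (pvOutA l) else pvOutA l := by
  rw [criticalize]
  rfl

theorem pv_altLoop_eq (l : List (Int × Int × String)) :
    pvAltLoop l = if l = [] then l else (if _h : pvNxtB l = l then l else pvAltLoop (pvNxtB l)) := by
  rw [pvAltLoop]
  rfl

theorem pv_outA_dec (l : List (Int × Int × String)) (hne : pvOutA l ≠ l) :
    pvTsCount (pvOutA l) < pvTsCount l :=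
  pv_flipA_dec (pvCriticalGatesA l) l hne

theorem pv_equal (fpan : List (Int × Int × String)) : criticalize fpan = criticalize_alt fpan := by
  unfold criticalize_alt
  suffices H : ∀ (n : Nat) (l : List (Int × Int × String)), pvTsCount l ≤ n → criticalize l = pvAltLoop l by
    exact H (pvTsCount fpan) fpan le_rfl
  intro n
  induction n using Nat.strong_induction_on with
  | _ n ih =>
    intro l hln
    rw [pv_criticalize_eq l, pv_altLoop_eq l]
    by_cases hnil : l = []
    · subst hnil
      have h0 : pvOutA [] = [] := by simp [pvOutA, PySem.List.enumerate_nil]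
      simp [h0]
    · rw [if_neg hnil]
      have hpass : pvOutA l = pvNxtB l := pv_pass_eq l hnil
      by_cases hfix : pvOutA l = l
      · rw [dif_neg (by simpa using hfix), dif_pos (by rw [← hpass]; exact hfix)]
        exact hfix
      · have hdec : pvTsCount (pvOutA l) < pvTsCount l := pv_outA_dec l hfix
        rw [dif_pos hfix, dif_neg (by rw [← hpass]; exact hfix), ← hpass]
        rcases Nat.eq_zero_or_pos n with hn0 | hnpos
        · omega
        · exact ih (n - 1) (by omega) (pvOutA l) (by omega)


-- ===== VERDICT (by name: the statement is the Claim_ definition above) =====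
theorem criticalize_spec : Claim_equal_criticalize := by
  intro fpan _ _
  unfold Spec_criticalize
  exact pv_equal fpan
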